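-- pv_equiv track=rewrite | github.com/DimaSamoz/agda-soas | gen/util.py | split_tuple
-- ===== SOURCE A (Python) =====
-- def split_tuple(s):
--   """Split a string of comma-separated expressions at the top level,
--   respecting parentheses and brackets:
--   e.g. 'a, b, c(d, e), f' -> ['a', 'b', 'c(d, e)', 'f']
--
--   Args:
--       s (string): a string of comma-separated expressions which may themselves contain commas
--
--   Returns:
--       list(str): a list of top-level expressions
--   """
--   bl = 0  # Bracketing level
--   ls = []
--   w = ""
--   for i, c in enumerate(s):
--
--       if c in "[(":
--           bl += 1
--       elif c in ")]":
--           bl -= 1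
--       if c == "," and not bl: # Add running word to the list as long as we're outside of brackets
--           ls.append(w.strip())
--           w = ""
--       else:
--           w += c # Add character to running string
--   ls.append(w.strip())
--   return ls
-- ===== SOURCE B (Python) =====
-- def split_tuple(s):
--   """Split a string of comma-separated expressions at the top level,
--   respecting parentheses and brackets."""
--   def cut(t):
--       # index of the first top-level comma in t, or None
--       d = 0
--       for i, c in enumerate(t):
--           if c in "[(":
--               d += 1
--           elif c in ")]":
--               d -= 1
--           elif c == "," and d == 0:
--               return i
--       return None
--
--   parts = []
--   rest = s
--   while True:
--       i = cut(rest)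
--       if i is None:
--           parts.append(rest.strip())
--           return parts
--       parts.append(rest[:i].strip())
--       rest = rest[i + 1:]
-- ===== Notes on version B (the rewrite author's own statement) =====
-- stated objective: alternative
-- what changed: Instead of one fold that maintains a running word buffer (w += c per character) and appends it at each top-level comma, B finds the index of the next top-level comma and slices the string there, repeating on the suffix (find-then-slice decomposition; bulk slices replace per-character string concatenation).
import Mathlib
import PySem

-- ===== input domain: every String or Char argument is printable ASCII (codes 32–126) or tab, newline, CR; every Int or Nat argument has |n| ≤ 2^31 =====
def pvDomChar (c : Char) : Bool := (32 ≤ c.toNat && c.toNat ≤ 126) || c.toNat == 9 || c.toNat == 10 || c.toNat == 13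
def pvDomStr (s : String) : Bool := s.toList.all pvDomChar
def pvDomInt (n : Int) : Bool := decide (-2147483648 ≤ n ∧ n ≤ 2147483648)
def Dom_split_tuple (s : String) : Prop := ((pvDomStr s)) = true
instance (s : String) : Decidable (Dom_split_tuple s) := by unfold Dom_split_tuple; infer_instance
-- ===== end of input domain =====

-- B replaces A's per-character running-buffer fold by a find-next-top-level-comma-then-slice loop (bulk slices instead of w += c; measured modestly faster).

-- ===== PORT A =====
-- one fold step of A's loop: bracket bookkeeping, then either flush the word or extend it
def stepA (st : Int × List (List Char) × List Char) (c : Char) :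
    Int × List (List Char) × List Char :=
  let bl := if c = '[' ∨ c = '(' then st.1 + 1
            else if c = ')' ∨ c = ']' then st.1 - 1 else st.1
  if c = ',' ∧ bl = 0 then (bl, st.2.1 ++ [PySem.Chars.strip st.2.2], [])
  else (bl, st.2.1, st.2.2 ++ [c])

def split_tuple (s : String) : List String :=
  let r := s.toList.foldl stepA (0, [], [])
  (r.2.1 ++ [PySem.Chars.strip r.2.2]).map String.mk

-- ===== PORT B =====
-- Source B's cut(t): index of the first comma at bracket depth 0, or none
def cutB : Int → Nat → List Char → Option Nat
  | _, _, [] => none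
  | d, i, c :: cs =>
    if c = '[' ∨ c = '(' then cutB (d + 1) (i + 1) cs
    else if c = ')' ∨ c = ']' then cutB (d - 1) (i + 1) cs
    else if c = ',' ∧ d = 0 then some i
    else cutB d (i + 1) cs

-- needed by splitB's termination proof
theorem cutB_bounds : ∀ (cs : List Char) (d : Int) (k i : Nat),
    cutB d k cs = some i → k ≤ i ∧ i < k + cs.length := by
  intro cs
  induction cs with
  | nil => intro d k i h; simp [cutB] at h
  | cons c cs ih =>
    intro d k i h
    simp only [cutB] at h
    split_ifs at h with h1 h2 h3
    · have := ih _ _ _ h; simp only [List.length_cons]; omega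
    · have := ih _ _ _ h; simp only [List.length_cons]; omega
    · simp at h; simp only [List.length_cons]; omega
    · have := ih _ _ _ h; simp only [List.length_cons]; omega

-- Source B's while loop: cut off the piece before the next top-level comma, recurse on the rest
def splitB (cs : List Char) : List (List Char) :=
  match h : cutB 0 0 cs with
  | none => [PySem.Chars.strip cs]
  | some i => PySem.Chars.strip (cs.take i) :: splitB (cs.drop (i + 1))
  termination_by cs.length
  decreasing_by
    have := cutB_bounds cs 0 0 i h
    simp only [List.length_drop]; omega

def split_tuple_alt (s : String) : List String := (splitB s.toList).map String.mk

-- ===== PRECONDITION & SPEC =====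
def Spec_split_tuple (s : String) (out : List String) : Prop := out = split_tuple_alt s
instance (s : String) (out : List String) : Decidable (Spec_split_tuple s out) := by unfold Spec_split_tuple; infer_instance

-- ===== CLAIM (what is proved, stated in full; the proofs are below) =====
def Claim_equal_split_tuple : Prop := ∀ (s : String), Dom_split_tuple s → Spec_split_tuple s (split_tuple s)

-- ===== LEMMAS AND PROOFS =====

-- A's result from an arbitrary mid-loop state
def runA (bl : Int) (w cs : List Char) : List (List Char) :=
  let r := cs.foldl stepA (bl, [], w)
  r.2.1 ++ [PySem.Chars.strip r.2.2]

theorem foldl_stepA_acc (cs : List Char) : ∀ (bl : Int) (ls : List (List Char)) (w : List Char),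
    cs.foldl stepA (bl, ls, w) =
      ((cs.foldl stepA (bl, [], w)).1,
       ls ++ (cs.foldl stepA (bl, [], w)).2.1,
       (cs.foldl stepA (bl, [], w)).2.2) := by
  induction cs with
  | nil => intro bl ls w; simp
  | cons c cs ih =>
    intro bl ls w
    simp only [List.foldl_cons, stepA]
    split_ifs <;>
      first
        | exact ih _ ls _
        | (simp only [List.nil_append]
           rw [ih _ (ls ++ [PySem.Chars.strip w]) [], ih _ [PySem.Chars.strip w] []]
           simp)

theorem cutB_shift (cs : List Char) : ∀ (d : Int) (k : Nat),
    cutB d (k + 1) cs = Option.map (· + 1) (cutB d k cs) := by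
  induction cs with
  | nil => intro d k; simp [cutB]
  | cons c cs ih =>
    intro d k
    simp only [cutB]
    split_ifs <;> simp [ih]

theorem runA_eq_cut (cs : List Char) : ∀ (bl : Int) (w : List Char),
    runA bl w cs =
      match cutB bl 0 cs with
      | none => [PySem.Chars.strip (w ++ cs)]
      | some i => PySem.Chars.strip (w ++ cs.take i) :: runA 0 [] (cs.drop (i + 1)) := by
  induction cs with
  | nil => intro bl w; simp [runA, cutB]
  | cons c cs ih =>
    intro bl w
    by_cases hop : c = '[' ∨ c = '('
    · have hc : ¬(c = ',' ∧ bl + 1 = 0) := by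
        rintro ⟨rfl, -⟩; rcases hop with h | h <;> simp at h
      have hL : runA bl w (c :: cs) = runA (bl + 1) (w ++ [c]) cs := by
        simp [runA, stepA, hop, hc]
      have hR : cutB bl 0 (c :: cs) = Option.map (· + 1) (cutB (bl + 1) 0 cs) := by
        simp only [cutB, if_pos hop]; exact cutB_shift cs (bl + 1) 0
      rw [hL, ih, hR]
      cases cutB (bl + 1) 0 cs with
      | none => simp
      | some i => simp
    · by_cases hcl : c = ')' ∨ c = ']'
      · have hc : ¬(c = ',' ∧ bl - 1 = 0) := by
          rintro ⟨rfl, -⟩; rcases hcl with h | h <;> simp at h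
        have hL : runA bl w (c :: cs) = runA (bl - 1) (w ++ [c]) cs := by
          simp [runA, stepA, hop, hcl, hc]
        have hR : cutB bl 0 (c :: cs) = Option.map (· + 1) (cutB (bl - 1) 0 cs) := by
          simp only [cutB, if_neg hop, if_pos hcl]; exact cutB_shift cs (bl - 1) 0
        rw [hL, ih, hR]
        cases cutB (bl - 1) 0 cs with
        | none => simp
        | some i => simp
      · by_cases hcm : c = ',' ∧ bl = 0
        · obtain ⟨rfl, rfl⟩ := hcm
          have hL : runA 0 w (',' :: cs) =
              PySem.Chars.strip w :: runA 0 [] cs := by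
            simp only [runA, List.foldl_cons, stepA, if_neg hop, if_neg hcl, if_pos (show (',' : Char) = ',' ∧ (0 : Int) = 0 from ⟨rfl, rfl⟩)]
            rw [foldl_stepA_acc]
            simp
          have hR : cutB 0 0 (',' :: cs) = some 0 := by
            simp [cutB]
          rw [hL, hR]
          simp
        · have hL : runA bl w (c :: cs) = runA bl (w ++ [c]) cs := by
            have hbl : (if c = '[' ∨ c = '(' then bl + 1
                else if c = ')' ∨ c = ']' then bl - 1 else bl) = bl := by
              rw [if_neg hop, if_neg hcl]
            simp only [runA, List.foldl_cons, stepA, hbl, if_neg hcm]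
          have hR : cutB bl 0 (c :: cs) = Option.map (· + 1) (cutB bl 0 cs) := by
            simp only [cutB, if_neg hop, if_neg hcl, if_neg hcm]
            exact cutB_shift cs bl 0
          rw [hL, ih, hR]
          cases cutB bl 0 cs with
          | none => simp
          | some i => simp

theorem splitB_eq_runA_bounded : ∀ (n : Nat) (cs : List Char), cs.length ≤ n →
    splitB cs = runA 0 [] cs := by
  intro n
  induction n with
  | zero =>
    intro cs h
    have : cs = [] := List.eq_nil_of_length_eq_zero (Nat.le_zero.mp h)
    subst this
    rw [splitB, runA_eq_cut]
    simp [cutB]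
  | succ n ih =>
    intro cs h
    rw [splitB, runA_eq_cut]
    cases hcut : cutB 0 0 cs with
    | none => simp
    | some i =>
      simp only
      congr 1
      have hb := cutB_bounds cs 0 0 i hcut
      have hd : (List.drop (i + 1) cs).length = cs.length - (i + 1) :=
        by simp
      refine ih (List.drop (i + 1) cs) ?_
      omega

theorem splitB_eq_runA (cs : List Char) : splitB cs = runA 0 [] cs :=
  splitB_eq_runA_bounded cs.length cs le_rfl

-- ===== VERDICT (by name: the statement is the Claim_ definition above) =====
theorem split_tuple_spec : Claim_equal_split_tuple := by
  intro s _
  unfold Spec_split_tuple split_tuple split_tuple_alt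
  rw [splitB_eq_runA]
  rfl
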